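-- pv_equiv track=rewrite | github.com/oreolic/SGE_EGFR | Endo_Count.py | mismatch
-- ===== SOURCE A (Python) =====
-- import itertools
-- from itertools import combinations
--
-- def mismatch (input, n):
--
--     input_len = len(input)
--     a = list(input)
--     dic = {}
--     loc = list(combinations(range(input_len),n))
--     nucleo_dic = {"A": ["T","G","C"], "T":["A","G","C"], "G":["A","T","C"], "C":["A","T","G"]}
--
--
--     for i in loc:
--         b = a.copy()
--         for k in range(len(i)):
--             b[i[k]] = nucleo_dic[b[i[k]]]
--         lst = list(itertools.product(*b))
--         for i in lst:
--             dic [''.join(i)] = input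
--
--     return dic
-- ===== SOURCE B (Python) =====
-- def mismatch(input, n):
--     nucleo_dic = {"A": ["T","G","C"], "T":["A","G","C"], "G":["A","T","C"], "C":["A","T","G"]}
--     L = len(input)
--
--     def subsets(start, k):
--         # ascending position tuples of size k drawn from start..L-1, lexicographic
--         if k == 0:
--             return [[]]
--         if k < 0 or k > L - start:
--             return []
--         return [[p] + rest for p in range(start, L - k + 1) for rest in subsets(p + 1, k - 1)]
--
--     def variants(i, ps):
--         # all strings for the suffix input[i:] mutated exactly at the positions ps (all >= i, ascending)
--         if not ps:
--             return [input[i:]]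
--         p = ps[0]
--         return [input[i:p] + alt + rest
--                 for alt in nucleo_dic[input[p]]
--                 for rest in variants(p + 1, ps[1:])]
--
--     return {v: input for ps in subsets(0, n) for v in variants(0, ps)}
-- ===== Notes on version B (the rewrite author's own statement) =====
-- stated objective: simpler
-- what changed: Replaces itertools.combinations over index tuples + in-place template mutation + itertools.product + join with two small recursions (a pruned recursive subset enumerator and a recursive variant builder over string slices) feeding a single dict comprehension.
import Mathlib
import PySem

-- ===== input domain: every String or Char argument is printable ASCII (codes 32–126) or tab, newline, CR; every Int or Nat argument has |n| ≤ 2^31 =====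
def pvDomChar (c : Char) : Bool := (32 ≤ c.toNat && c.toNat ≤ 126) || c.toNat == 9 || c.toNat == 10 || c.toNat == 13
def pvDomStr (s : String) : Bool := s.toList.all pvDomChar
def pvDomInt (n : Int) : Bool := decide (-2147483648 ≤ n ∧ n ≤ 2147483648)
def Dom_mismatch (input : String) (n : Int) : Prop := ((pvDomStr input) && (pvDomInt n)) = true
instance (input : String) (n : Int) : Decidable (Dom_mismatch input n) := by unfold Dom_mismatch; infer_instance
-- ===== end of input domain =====

-- B replaces itertools.combinations + template mutation + itertools.product with two small
-- recursions feeding a dict comprehension (objective: simpler). Proof: A = B for n ≥ 0 on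
-- inputs where A does not raise (KeyError inputs are excluded by Pre_ but the ports agree there too).

-- ===== PORT A =====
-- nucleo_dic lookup; other characters raise KeyError in Python (outside Pre_), default [] here
def nucleoDic (c : Char) : List Char :=
  if c = 'A' then ['T', 'G', 'C']
  else if c = 'T' then ['A', 'G', 'C']
  else if c = 'G' then ['A', 'T', 'C']
  else if c = 'C' then ['A', 'T', 'G']
  else []

-- itertools.combinations(xs, k): lexicographic k-subsequences
def combosA : Nat → List Nat → List (List Nat)
  | 0, _ => [[]]
  | _ + 1, [] => []
  | k + 1, x :: xs => ((combosA k xs).map (x :: ·)) ++ combosA (k + 1) xs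

-- itertools.product(*b): leftmost factor varies slowest
def prodA : List (List Char) → List (List Char)
  | [] => [[]]
  | xs :: rest => xs.flatMap (fun x => (prodA rest).map (x :: ·))

-- A's inner loop: b[i[k]] = nucleo_dic[b[i[k]]] (cell is still the original single char)
def bldA (a : List Char) (i : List Nat) : List (List Char) :=
  i.foldl (fun b p => b.set p (nucleoDic ((b.getD p []).headD ' '))) (a.map (fun c => [c]))

-- n < 0 makes Python raise ValueError (outside Pre_); .toNat is used only there
def mismatch (input : String) (n : Int) : List (String × String) :=
  let a := input.toList
  let loc := combosA n.toNat (List.range a.length)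
  let dic := loc.foldl
    (fun dic i =>
      let b := bldA a i
      (prodA b).foldl (fun dic s => dic.insert (String.mk s) input) dic)
    PySem.Dict.empty
  dic.items

-- ===== PORT B =====
-- subsets(start, k): ascending position lists, lexicographic, pruned; range(start, L-k+1)
def subsetsB (L : Nat) (start : Nat) (k : Int) : List (List Nat) :=
  if k = 0 then [[]]
  else if k < 0 ∨ (L : Int) - start < k then []
  else (List.range' start ((L + 1 - k - start : Int)).toNat).flatMap
        (fun p => (subsetsB L (p + 1) (k - 1)).map (p :: ·))
termination_by k.toNat
decreasing_by omega

-- variants(i, ps): strings for input[i:] mutated exactly at ps; Python str ≡ List Char (PySem.Chars)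
def variantsB (a : List Char) (i : Nat) : List Nat → List (List Char)
  | [] => [a.drop i]
  | p :: ps =>
      (nucleoDic (a.getD p ' ')).flatMap
        (fun alt => (variantsB a (p + 1) ps).map
          (fun rest => (a.drop i).take (p - i) ++ alt :: rest))

def mismatch_alt (input : String) (n : Int) : List (String × String) :=
  let a := input.toList
  (((subsetsB a.length 0 n).flatMap (fun ps => variantsB a 0 ps)).foldl
    (fun dic v => dic.insert (String.mk v) input) PySem.Dict.empty).items

-- ===== PRECONDITION & SPEC =====
-- Pre_ excludes exactly the inputs where Python A raises: n < 0 (ValueError from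
-- itertools.combinations) and 1 ≤ n ≤ len(input) with a character outside "ATGC" (KeyError).
def Pre_mismatch (input : String) (n : Int) : Prop :=
  0 ≤ n ∧ (1 ≤ n → n ≤ (input.toList.length : Int) →
    (input.toList.all (fun c => c == 'A' || c == 'T' || c == 'G' || c == 'C')) = true)
instance (input : String) (n : Int) : Decidable (Pre_mismatch input n) := by
  unfold Pre_mismatch; infer_instance

def pvWitness_mismatch : String × Int := ("AT", 1)

def Spec_mismatch (input : String) (n : Int) (out : List (String × String)) : Prop := out = mismatch_alt input n
instance (input : String) (n : Int) (out : List (String × String)) : Decidable (Spec_mismatch input n out) := by unfold Spec_mismatch; infer_instance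

-- ===== CLAIM (what is proved, stated in full; the proofs are below) =====
def Claim_equal_mismatch : Prop := ∀ (input : String) (n : Int), Dom_mismatch input n → Pre_mismatch input n → Spec_mismatch input n (mismatch input n)

-- ===== LEMMAS AND PROOFS =====

theorem foldl_set_length (ps : List Nat) (t : List (List Char)) :
    (ps.foldl (fun b p => b.set p (nucleoDic ((b.getD p []).headD ' '))) t).length = t.length := by
  induction ps generalizing t with
  | nil => rfl
  | cons p ps ih => simpa using ih (t.set p (nucleoDic ((t.getD p []).headD ' ')))

theorem foldl_set_get (ps : List Nat) (t : List (List Char)) (hnd : ps.Nodup)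
    (hlt : ∀ p ∈ ps, p < t.length) (j : Nat) (hj : j < t.length) :
    (ps.foldl (fun b p => b.set p (nucleoDic ((b.getD p []).headD ' '))) t).getD j [] =
      if j ∈ ps then nucleoDic ((t.getD j []).headD ' ') else t.getD j [] := by
  induction ps generalizing t with
  | nil => simp
  | cons p ps ih =>
    have hp : p < t.length := hlt p (by simp)
    have hpn : p ∉ ps := (List.nodup_cons.mp hnd).1
    rw [List.foldl_cons,
      ih (t.set p (nucleoDic ((t.getD p []).headD ' '))) hnd.of_cons
        (fun q hq => by simpa using hlt q (by simp [hq])) (by simpa using hj)]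
    by_cases hjp : j = p
    · subst hjp
      simp [List.getD, hj, hpn]
    · simp [List.getD, hj, hjp, Ne.symm hjp, List.mem_cons]

theorem bldA_length (a : List Char) (ps : List Nat) : (bldA a ps).length = a.length := by
  unfold bldA
  rw [foldl_set_length, List.length_map]

theorem bldA_get (a : List Char) (ps : List Nat) (hnd : ps.Nodup)
    (hlt : ∀ p ∈ ps, p < a.length) (j : Nat) (hj : j < a.length) :
    (bldA a ps).getD j [] =
      if j ∈ ps then nucleoDic (a.getD j ' ') else [a.getD j ' '] := by
  unfold bldA
  rw [foldl_set_get ps (a.map (fun c => [c])) hnd (by simpa using hlt) j (by simpa using hj)]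
  simp [List.getD, hj]

theorem bldA_drop (a : List Char) (p : Nat) (ps : List Nat) (i : Nat) (hip : i ≤ p)
    (hpL : p < a.length) (hgt : ∀ q ∈ ps, p < q) (hbd : ∀ q ∈ ps, q < a.length)
    (hnd : ps.Nodup) :
    (bldA a (p :: ps)).drop i =
      ((a.drop i).take (p - i)).map (fun c => [c]) ++
        nucleoDic (a.getD p ' ') :: ((bldA a ps).drop (p + 1)) := by
  have hndc : (p :: ps).Nodup :=
    List.nodup_cons.mpr ⟨fun h => absurd (hgt p h) (lt_irrefl p), hnd⟩
  have hbdc : ∀ q ∈ p :: ps, q < a.length := by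
    intro q hq; rcases List.mem_cons.mp hq with h | h
    · exact h ▸ hpL
    · exact hbd q h
  apply List.ext_getElem
  · simp [bldA_length]; omega
  · intro j h1 h2
    have hjlt : i + j < a.length := by
      have := h1; simp [bldA_length] at this; omega
    have hLHS : ((bldA a (p :: ps)).drop i).getD j [] =
        if i + j ∈ p :: ps then nucleoDic (a.getD (i + j) ' ') else [a.getD (i + j) ' '] := by
      rw [List.getD_eq_getElem _ _ h1, List.getElem_drop,
        ← List.getD_eq_getElem _ ([] : List Char) (by rw [bldA_length]; exact hjlt),
        bldA_get a (p :: ps) hndc hbdc (i + j) hjlt]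
    rw [← List.getD_eq_getElem _ ([] : List Char) h1, hLHS,
      ← List.getD_eq_getElem _ ([] : List Char) h2]
    have hlenL : (((a.drop i).take (p - i)).map (fun c : Char => [c])).length = p - i := by
      simp; omega
    by_cases hc1 : j < p - i
    · have hmem : i + j ∉ p :: ps := by
        intro h; rcases List.mem_cons.mp h with h | h
        · omega
        · exact absurd (hgt _ h) (by omega)
      rw [List.getD_eq_getElem _ _ h2, List.getElem_append_left (by omega)]
      simp [hmem, List.getElem_drop, List.getD, List.getElem?_eq_getElem, hjlt]
    · rw [List.getD_eq_getElem _ _ h2, List.getElem_append_right (by omega)]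
      by_cases hc2 : j = p - i
      · have hp' : i + j = p := by omega
        simp [hc2, hp', List.getD, List.getElem?_eq_getElem, hjlt, hpL,
          show min (p - i) (a.length - i) = p - i from by omega,
          show i + (p - i) = p from by omega]
      · rw [List.getElem_cons, dif_neg (by rw [hlenL]; omega)]
        rw [List.getElem_drop,
          ← List.getD_eq_getElem _ ([] : List Char)
            (by rw [bldA_length]; rw [hlenL]; omega),
          bldA_get a ps hnd hbd _ (by rw [hlenL]; omega)]
        have hne : i + j ≠ p := by omega
        rw [hlenL, show p + 1 + (j - (p - i) - 1) = i + j by omega]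
        simp [List.mem_cons, hne]

theorem prodA_singles (l : List Char) : prodA (l.map (fun c => [c])) = [l] := by
  induction l with
  | nil => rfl
  | cons c l ih => simp [prodA, ih]

theorem prodA_append (xs ys : List (List Char)) :
    prodA (xs ++ ys) = (prodA xs).flatMap (fun u => (prodA ys).map (u ++ ·)) := by
  induction xs with
  | nil => simp [prodA]
  | cons x xs ih =>
    simp only [List.cons_append, prodA, ih]
    simp [List.flatMap_map, List.map_flatMap, List.map_map, Function.comp_def, List.flatMap_assoc, List.cons_append]

theorem prod_bld_drop (a : List Char) (ps : List Nat) :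
    ∀ (i : Nat), (∀ q ∈ ps, i ≤ q) → (∀ q ∈ ps, q < a.length) → ps.Pairwise (· < ·) →
    prodA ((bldA a ps).drop i) = variantsB a i ps := by
  induction ps with
  | nil =>
    intro i _ _ _
    show prodA ((a.map (fun c => [c])).drop i) = _
    rw [← List.map_drop, prodA_singles]
    rfl
  | cons p ps ih =>
    intro i hi hbd hpw
    have hgt : ∀ q ∈ ps, p < q := fun q hq => List.rel_of_pairwise_cons hpw hq
    have hnd : ps.Nodup := (hpw.of_cons).imp (fun h => Nat.ne_of_lt h)
    have hpL : p < a.length := hbd p (by simp)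
    have hip : i ≤ p := hi p (by simp)
    rw [bldA_drop a p ps i hip hpL hgt (fun q hq => hbd q (by simp [hq])) hnd,
        prodA_append, prodA_singles,
        show prodA (nucleoDic (a.getD p ' ') :: (bldA a ps).drop (p + 1)) =
          (nucleoDic (a.getD p ' ')).flatMap
            (fun x => ((bldA a ps).drop (p + 1) |> prodA).map (x :: ·)) from rfl,
        ih (p + 1) (fun q hq => hgt q hq) (fun q hq => hbd q (by simp [hq])) hpw.of_cons]
    simp [variantsB, List.map_flatMap, List.map_map, Function.comp_def]

theorem combosA_nil : ∀ (xs : List Nat) (k : Nat), xs.length < k → combosA k xs = [] := by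
  intro xs
  induction xs with
  | nil =>
    intro k hk
    match k, hk with
    | k + 1, _ => rfl
  | cons x xs ih =>
    intro k hk
    match k, hk with
    | k + 1, hk =>
      show (combosA k xs).map (x :: ·) ++ combosA (k + 1) xs = []
      rw [ih k (by simpa using hk), ih (k + 1) (by simp at hk ⊢; omega)]
      rfl

theorem combosA_sublist : ∀ (xs : List Nat) (k : Nat) (ps : List Nat),
    ps ∈ combosA k xs → ps.Sublist xs := by
  intro xs
  induction xs with
  | nil =>
    intro k ps hps
    match k, hps with
    | 0, hps => simp [combosA] at hps; simp [hps]
  | cons x xs ih =>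
    intro k ps hps
    match k with
    | 0 => simp [combosA] at hps; simp [hps]
    | k + 1 =>
      rcases List.mem_append.mp hps with h | h
      · obtain ⟨qs, hqs, rfl⟩ := List.mem_map.mp h
        exact (ih k qs hqs).cons₂ x
      · exact (ih (k + 1) ps h).cons x

theorem combosA_range' : ∀ (m k s : Nat), combosA (k + 1) (List.range' s m) =
    (List.range' s (m - k)).flatMap
      (fun p => (combosA k (List.range' (p + 1) (s + m - p - 1))).map (p :: ·)) := by
  intro m
  induction m with
  | zero => intro k s; simp [combosA]
  | succ m ih =>
    intro k s
    rw [List.range'_succ]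
    show (combosA k (List.range' (s + 1) m)).map (s :: ·) ++
      combosA (k + 1) (List.range' (s + 1) m) = _
    by_cases hk : k ≤ m
    · rw [show m + 1 - k = (m - k) + 1 from by omega, List.range'_succ, List.flatMap_cons,
        ih k (s + 1), show s + (m + 1) - s - 1 = m from by omega]
      congr 1
      apply List.flatMap_congr
      intro p hp
      rw [show s + 1 + m - p - 1 = s + (m + 1) - p - 1 from by omega]
    · rw [combosA_nil _ k (by simp; omega), combosA_nil _ (k + 1) (by simp; omega),
        show m + 1 - k = 0 from by omega]
      rfl

theorem subsetsB_eq_combosA : ∀ (k : Nat) (L start : Nat),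
    subsetsB L start (k : Int) = combosA k (List.range' start (L - start)) := by
  intro k
  induction k with
  | zero => intro L start; rw [subsetsB]; simp [combosA]
  | succ k ih =>
    intro L start
    rw [subsetsB]
    rw [if_neg (by push_cast; omega)]
    by_cases hlt : (L : Int) - start < ((k : Nat) + 1 : Nat)
    · rw [if_pos (by push_cast at hlt ⊢; omega)]
      rw [combosA_nil _ (k + 1) (by simp; omega)]
    · rw [if_neg (by push_cast at hlt ⊢; omega)]
      rw [combosA_range' (L - start) k start]
      rw [show ((L : Int) + 1 - ((k : Nat) + 1 : Nat) - start).toNat = L - start - k from by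
        push_cast at hlt ⊢; omega]
      apply List.flatMap_congr
      intro p hp
      have hpmem := List.mem_range'_1.mp hp
      rw [show (((k + 1 : Nat)) : Int) - 1 = ((k : Nat) : Int) from by push_cast; omega]
      rw [ih L (p + 1)]
      rw [show start + (L - start) - p - 1 = L - (p + 1) from by omega]

theorem keys_eq (a : List Char) (n : Int) (hn : 0 ≤ n) :
    (combosA n.toNat (List.range a.length)).flatMap (fun i => prodA (bldA a i)) =
    (subsetsB a.length 0 n).flatMap (fun ps => variantsB a 0 ps) := by
  conv_rhs => rw [show (n : Int) = ((n.toNat : Nat) : Int) from by omega]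
  rw [subsetsB_eq_combosA n.toNat a.length 0, Nat.sub_zero, ← List.range_eq_range']
  apply List.flatMap_congr
  intro ps hps
  have hsub : ps.Sublist (List.range a.length) := combosA_sublist _ _ ps hps
  have hpw : ps.Pairwise (· < ·) := List.Pairwise.sublist hsub List.pairwise_lt_range
  have hbd : ∀ q ∈ ps, q < a.length := fun q hq => List.mem_range.mp (hsub.subset hq)
  rw [show bldA a ps = (bldA a ps).drop 0 from (List.drop_zero).symm]
  exact prod_bld_drop a ps 0 (fun q _ => Nat.zero_le q) hbd hpw

-- ===== VERDICT (by name: the statement is the Claim_ definition above) =====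
theorem mismatch_spec : Claim_equal_mismatch := by
  intro input n _ hpre
  show mismatch input n = mismatch_alt input n
  simp only [mismatch, mismatch_alt]
  rw [← List.foldl_flatMap, keys_eq input.toList n hpre.1]
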